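-- pv_equiv track=rewrite | github.com/ttvpro007/PythonProblems | labs109.py | taxi_zum_zum
-- ===== SOURCE A (Python) =====
-- def taxi_zum_zum(moves):
--
--     # 4 directions represented as (x, y)
--     four_directions = [(0, 1), (1, 0), (0, -1), (-1, 0)]
--     current_direction = 0
--     current_position = (0, 0)
--
--     for move in moves:
--
--         if move == 'R':
--             current_direction += 1
--
--         if move == 'L':
--             current_direction -= 1
--
--         if move == 'F':
--             current_position = get_new_position(current_position, four_directions[current_direction % 4])
--
--     return current_position
--
-- def get_new_position(current_position, direction):
--     return (current_position[0] + direction[0], current_position[1] + direction[1])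
-- ===== SOURCE B (Python) =====
-- def taxi_zum_zum(moves):
--     # Divide-and-conquer: each move is an element of the rigid-motion monoid
--     # (rotation class r mod 4, translation t expressed in the starting frame);
--     # compose the two halves' elements instead of stepping a state per move.
--     r, t = _compose(moves, 0, len(moves))
--     return t
--
-- def _rot(r, v):
--     x, y = v
--     r %= 4
--     if r == 0:
--         return (x, y)
--     if r == 1:
--         return (y, -x)
--     if r == 2:
--         return (-x, -y)
--     return (-y, x)
--
-- def _compose(s, lo, hi):
--     if hi - lo == 0:
--         return (0, (0, 0))
--     if hi - lo == 1:
--         m = s[lo]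
--         if m == 'R':
--             return (1, (0, 0))
--         if m == 'L':
--             return (3, (0, 0))
--         if m == 'F':
--             return (0, (0, 1))
--         return (0, (0, 0))
--     mid = (lo + hi) // 2
--     r1, t1 = _compose(s, lo, mid)
--     r2, t2 = _compose(s, mid, hi)
--     x2, y2 = _rot(r1, t2)
--     return ((r1 + r2) % 4, (t1[0] + x2, t1[1] + y2))
-- ===== Notes on version B (the rewrite author's own statement) =====
-- stated objective: alternative
-- what changed: B replaces A's single left-to-right pass over a (direction index, position) state by a divide-and-conquer that maps each half of the string to an element (rotation class mod 4, frame-local translation) of the rigid-motion monoid and composes the two halves' elements.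
import Mathlib
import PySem

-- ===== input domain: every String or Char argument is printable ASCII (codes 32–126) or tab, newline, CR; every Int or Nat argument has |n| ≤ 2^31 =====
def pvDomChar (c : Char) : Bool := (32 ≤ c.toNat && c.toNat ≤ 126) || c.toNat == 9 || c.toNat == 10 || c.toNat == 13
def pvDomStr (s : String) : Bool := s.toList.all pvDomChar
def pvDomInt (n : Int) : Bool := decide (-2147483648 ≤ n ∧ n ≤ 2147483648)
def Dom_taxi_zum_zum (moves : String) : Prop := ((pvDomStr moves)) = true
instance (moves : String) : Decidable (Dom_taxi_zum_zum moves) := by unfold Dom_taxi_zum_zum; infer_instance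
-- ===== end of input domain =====

-- B: divide-and-conquer composing rigid-motion monoid elements instead of A's per-move state pass; objective: alternative.

-- ===== PORT A =====
-- Python helper get_new_position
def get_new_position (p : Int × Int) (d : Int × Int) : Int × Int :=
  (p.1 + d.1, p.2 + d.2)

-- one iteration of A's loop body over state (current_direction, current_position)
def taxiStepA (four_directions : List (Int × Int)) (st : Int × (Int × Int)) (move : Char) :
    Int × (Int × Int) :=
  let d := if move = 'R' then st.1 + 1 else st.1
  let d := if move = 'L' then d - 1 else d
  let pos :=
    if move = 'F' then
      -- four_directions[d % 4]: index is always 0..3, so pyGet? never fails; .getD (0,0) is unreachable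
      get_new_position st.2 ((PySem.List.pyGet? four_directions (PySem.Int.mod d 4)).getD (0, 0))
    else st.2
  (d, pos)

def taxi_zum_zum (moves : String) : Int × Int :=
  let four_directions : List (Int × Int) := [(0, 1), (1, 0), (0, -1), (-1, 0)]
  (moves.toList.foldl (taxiStepA four_directions) (0, (0, 0))).2

-- ===== PORT B =====
-- Python helper _rot: rotate vector v right r quarter-turns (r %= 4 first, Python's %)
def rotAux (r : Int) (v : Int × Int) : Int × Int :=
  if r = 0 then (v.1, v.2)
  else if r = 1 then (v.2, -v.1)
  else if r = 2 then (-v.1, -v.2)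
  else (-v.2, v.1)

def rotB (r : Int) (v : Int × Int) : Int × Int :=
  rotAux (PySem.Int.mod r 4) v

-- Python helper _compose(s, lo, hi): here on the sub-list itself (same subsegments)
def composeB : List Char → Int × (Int × Int)
  | [] => (0, (0, 0))
  | [m] =>
      if m = 'R' then (1, (0, 0))
      else if m = 'L' then (3, (0, 0))
      else if m = 'F' then (0, (0, 1))
      else (0, (0, 0))
  | c1 :: c2 :: rest =>
      let s := c1 :: c2 :: rest
      let mid := s.length / 2
      let e1 := composeB (s.take mid)
      let e2 := composeB (s.drop mid)
      let t2' := rotB e1.1 e2.2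
      (PySem.Int.mod (e1.1 + e2.1) 4, (e1.2.1 + t2'.1, e1.2.2 + t2'.2))
  termination_by l => l.length
  decreasing_by
    · simp [List.length_take]; omega
    · simp [List.length_drop]; omega

def taxi_zum_zum_alt (moves : String) : Int × Int :=
  (composeB moves.toList).2

-- ===== PRECONDITION & SPEC =====
def Spec_taxi_zum_zum (moves : String) (out : Int × Int) : Prop := out = taxi_zum_zum_alt moves
instance (moves : String) (out : Int × Int) : Decidable (Spec_taxi_zum_zum moves out) := by unfold Spec_taxi_zum_zum; infer_instance

-- ===== CLAIM (what is proved, stated in full; the proofs are below) =====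
def Claim_equal_taxi_zum_zum : Prop := ∀ (moves : String), Dom_taxi_zum_zum moves → Spec_taxi_zum_zum moves (taxi_zum_zum moves)

-- ===== LEMMAS AND PROOFS =====

theorem mod4_emod (d : Int) : PySem.Int.mod d 4 = d % 4 :=
  PySem.Int.mod_eq_emod_of_pos (by norm_num)

theorem rotB_congr (a b : Int) (h : a % 4 = b % 4) (v : Int × Int) : rotB a v = rotB b v := by
  unfold rotB; rw [mod4_emod, mod4_emod, h]

theorem rotB_zero_vec (r : Int) : rotB r (0, 0) = (0, 0) := by
  unfold rotB rotAux; split_ifs <;> simp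

theorem rotB_rotB (a b : Int) (v : Int × Int) : rotB a (rotB b v) = rotB (a + b) v := by
  unfold rotB rotAux
  simp only [mod4_emod]
  have ha0 : 0 ≤ a % 4 := Int.emod_nonneg a (by norm_num)
  have ha1 : a % 4 < 4 := Int.emod_lt_of_pos a (by norm_num)
  have hb0 : 0 ≤ b % 4 := Int.emod_nonneg b (by norm_num)
  have hb1 : b % 4 < 4 := Int.emod_lt_of_pos b (by norm_num)
  have hab : (a + b) % 4 = (a % 4 + b % 4) % 4 := by omega
  interval_cases h : a % 4 <;> interval_cases h' : b % 4 <;>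
    rw [hab] <;> norm_num

theorem rotB_add (r : Int) (u v : Int × Int) :
    rotB r (u.1 + v.1, u.2 + v.2) = ((rotB r u).1 + (rotB r v).1, (rotB r u).2 + (rotB r v).2) := by
  unfold rotB rotAux; split_ifs <;> simp <;> omega

theorem rotB_north (d : Int) :
    rotB d (0, 1)
      = (PySem.List.pyGet? [((0 : Int), (1 : Int)), (1, 0), (0, -1), (-1, 0)] (PySem.Int.mod d 4)).getD (0, 0) := by
  unfold rotB rotAux
  simp only [mod4_emod]
  have h0 : 0 ≤ d % 4 := Int.emod_nonneg d (by norm_num)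
  have h1 : d % 4 < 4 := Int.emod_lt_of_pos d (by norm_num)
  interval_cases h : d % 4 <;> simp_all [PySem.List.pyGet?, PySem.List.pyIdx?]

-- the invariant: A's fold from (d, p) over l ends at direction ≡ d + r (mod 4)
-- and position p + rotB d t, where (r, t) = composeB l
theorem compose_correct_aux (n : Nat) : ∀ (l : List Char), l.length ≤ n → ∀ (d : Int) (p : Int × Int),
    (l.foldl (taxiStepA [(0,1),(1,0),(0,-1),(-1,0)]) (d, p)).1 % 4 = (d + (composeB l).1) % 4 ∧
    (l.foldl (taxiStepA [(0,1),(1,0),(0,-1),(-1,0)]) (d, p)).2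
      = (p.1 + (rotB d (composeB l).2).1, p.2 + (rotB d (composeB l).2).2) := by
  induction n with
  | zero =>
      intro l hl d p
      have : l = [] := List.eq_nil_of_length_eq_zero (Nat.le_zero.mp hl)
      subst this
      simp [composeB, rotB_zero_vec]
  | succ n ih =>
      intro l hl d p
      match l with
      | [] => simp [composeB, rotB_zero_vec]
      | [m] =>
          simp only [composeB, List.foldl_cons, List.foldl_nil, taxiStepA]
          by_cases hR : m = 'R' <;> by_cases hL : m = 'L' <;> by_cases hF : m = 'F' <;>
            simp_all [rotB_zero_vec, rotB_north, get_new_position] <;> omega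
      | c1 :: c2 :: rest =>
          set s : List Char := c1 :: c2 :: rest with hs
          have hlen : 2 ≤ s.length := by simp [hs]
          have hmid1 : 1 ≤ s.length / 2 := by omega
          have hmid2 : s.length / 2 < s.length := by omega
          have htake : (s.take (s.length / 2)).length ≤ n := by
            simp only [List.length_take]
            have : s.length ≤ n + 1 := hl
            omega
          have hdrop : (s.drop (s.length / 2)).length ≤ n := by
            simp only [List.length_drop]
            have : s.length ≤ n + 1 := hl
            omega
          have hsplit : s = s.take (s.length / 2) ++ s.drop (s.length / 2) :=
            (List.take_append_drop _ _).symm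
          obtain ⟨h1d, h1p⟩ := ih (s.take (s.length / 2)) htake d p
          set st1 := (s.take (s.length / 2)).foldl (taxiStepA [(0,1),(1,0),(0,-1),(-1,0)]) (d, p) with hst1
          obtain ⟨h2d, h2p⟩ := ih (s.drop (s.length / 2)) hdrop st1.1 st1.2
          have hfold : s.foldl (taxiStepA [(0,1),(1,0),(0,-1),(-1,0)]) (d, p)
              = (s.drop (s.length / 2)).foldl (taxiStepA [(0,1),(1,0),(0,-1),(-1,0)]) (st1.1, st1.2) := by
            conv_lhs => rw [hsplit]
            rw [List.foldl_append, ← hst1]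
          have hcomp : composeB s
              = (PySem.Int.mod ((composeB (s.take (s.length / 2))).1 + (composeB (s.drop (s.length / 2))).1) 4,
                 ((composeB (s.take (s.length / 2))).2.1 + (rotB (composeB (s.take (s.length / 2))).1 (composeB (s.drop (s.length / 2))).2).1,
                  (composeB (s.take (s.length / 2))).2.2 + (rotB (composeB (s.take (s.length / 2))).1 (composeB (s.drop (s.length / 2))).2).2)) := by
            conv_lhs => rw [hs, composeB]
          rw [hfold, hcomp]
          constructor
          · rw [h2d]
            simp only [mod4_emod]
            omega
          · rw [h2p]
            have hc : rotB st1.1 (composeB (s.drop (s.length / 2))).2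
                = rotB d (rotB (composeB (s.take (s.length / 2))).1 (composeB (s.drop (s.length / 2))).2) := by
              rw [rotB_rotB]
              exact rotB_congr _ _ (by rw [h1d]) _
            rw [hc, h1p]
            rw [rotB_add]
            simp
            constructor <;> ring

-- ===== VERDICT (by name: the statement is the Claim_ definition above) =====
theorem taxi_zum_zum_spec : Claim_equal_taxi_zum_zum := by
  intro moves _
  unfold Spec_taxi_zum_zum taxi_zum_zum taxi_zum_zum_alt
  have h := (compose_correct_aux moves.toList.length moves.toList le_rfl 0 (0, 0)).2
  have hr : rotB 0 (composeB moves.toList).2 = (composeB moves.toList).2 := by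
    unfold rotB rotAux; simp [PySem.Int.mod]
  rw [hr] at h
  simpa using h
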